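-- pv_equiv track=rewrite | github.com/astewardnolan/Algo-hw10 | hwk10.py | find_permutations_iteratively
-- ===== SOURCE A (Python) =====
-- def selection_sort(arr: set) -> list:
--     # Convert the set to a list so we can work with indices
--     arr_list = list(arr)
--
--     # Loop through the entire list (which is now a list derived from the set)
--     for i in range(len(arr_list)):
--         # Find the index of the minimum element in the unsorted part of the list
--         min_index = i
--         for j in range(i + 1, len(arr_list)):
--             if arr_list[j] < arr_list[min_index]:
--                 min_index = j
--
--         # Swap the found minimum element with the first element of the unsorted part
--         arr_list[i], arr_list[min_index] = arr_list[min_index], arr_list[i]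
--
--     # Return the sorted list
--     return arr_list
--
-- def find_permutations_iteratively(target_length):
--     lengths = [12, 10, 8, 6, 4, 2, 1]
--     all_combinations = set()  # Use a set to avoid duplicates
--     stack = [(target_length, [])]  # Initialize stack with the target length and an empty combination
--
--     while stack:
--         current_length, current_combination = stack.pop()
--
--         if current_length == 0:
--             # Add the combination as a tuple to the set
--             all_combinations.add(tuple(selection_sort(current_combination)))
--             continue
--
--         for length in lengths:
--             if length <= current_length:
--                 # Create a new combination with the current length included
--                 new_combination = current_combination + [length]
--                 stack.append((current_length - length, new_combination))
--
--     return all_combinations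
-- ===== SOURCE B (Python) =====
-- def find_permutations_iteratively(target_length):
--     parts = [1, 2, 4, 6, 8, 10, 12]
--
--     def gen(remaining, min_part):
--         # partitions of `remaining` into allowed parts, written in
--         # non-decreasing order with every part >= min_part
--         if remaining == 0:
--             return [()]
--         out = []
--         for p in parts:
--             if min_part <= p <= remaining:
--                 for rest in gen(remaining - p, p):
--                     out.append((p,) + rest)
--         return out
--
--     return set(gen(target_length, 1))
-- ===== Notes on version B (the rewrite author's own statement) =====
-- stated objective: faster
-- what changed: Instead of exploring every ordering of parts with a stack and deduplicating selection-sorted copies in a set, B generates each combination exactly once, directly in non-decreasing order, by recursing with a minimum-part bound, so no sorting and no deduplication is needed; intended as faster (A is exponential in the number of orderings) and a timing run saw A time out at n=16 where B still returned, though it could not confirm a clean ratio.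
import Mathlib
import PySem

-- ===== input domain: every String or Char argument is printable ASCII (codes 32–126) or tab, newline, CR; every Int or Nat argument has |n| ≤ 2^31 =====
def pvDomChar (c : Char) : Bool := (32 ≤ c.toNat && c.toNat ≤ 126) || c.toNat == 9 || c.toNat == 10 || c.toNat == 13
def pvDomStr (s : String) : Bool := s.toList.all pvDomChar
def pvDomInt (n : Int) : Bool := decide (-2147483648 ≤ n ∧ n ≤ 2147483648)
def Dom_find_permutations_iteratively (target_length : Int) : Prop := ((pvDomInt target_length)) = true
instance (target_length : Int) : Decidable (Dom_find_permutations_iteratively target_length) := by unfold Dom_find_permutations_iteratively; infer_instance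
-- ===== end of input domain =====

-- B replaces A's stack search over all orderings of the parts (deduplicated through a set
-- of selection-sorted tuples) by a recursion that emits each combination exactly once,
-- directly in non-decreasing order, so it needs no sorting and no deduplication.
-- Intended as faster (exponentially fewer nodes); a timing run saw A time out at
-- n=16 where B still returned, but could not confirm a ratio (faster: unconfirmed).

-- ===== PORT A =====
-- `lengths` of A
def pvParts : List Int := [12, 10, 8, 6, 4, 2, 1]

-- the in-place swap `arr[i], arr[mi] = arr[mi], arr[i]` (the indices A uses are always
-- in range, so the `getD _ 0` reads are exact)
def pvSwap (arr : List Int) (i j : Nat) : List Int :=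
  (arr.set i (arr.getD j 0)).set j (arr.getD i 0)

-- inner loop of selection_sort: `for j in range(i+1, len): if arr[j] < arr[min_index]: …`
def pvMinIdx (arr : List Int) (i : Nat) : Nat :=
  (List.range' (i + 1) (arr.length - (i + 1))).foldl
    (fun mi j => if arr.getD j 0 < arr.getD mi 0 then j else mi) i

theorem pvSwap_length (arr : List Int) (i j : Nat) : (pvSwap arr i j).length = arr.length := by
  simp [pvSwap]

-- outer loop of selection_sort: `for i in range(len(arr_list)): … swap …`
def pvSelLoop (arr : List Int) (i : Nat) : List Int :=
  if _h : i < arr.length then pvSelLoop (pvSwap arr i (pvMinIdx arr i)) (i + 1) else arr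
termination_by arr.length - i
decreasing_by rw [pvSwap_length]; omega

-- selection_sort (A calls it on a list, so `list(arr)` is a plain copy)
def pySelectionSort (arr : List Int) : List Int := pvSelLoop arr 0

-- body of `for length in lengths: if length <= current_length: stack.append(…)`
def pvPush (c : Int) (comb : List Int) (st : List (Int × List Int)) (l : Int) :
    List (Int × List Int) :=
  if l ≤ c then (c - l, comb ++ [l]) :: st else st

-- termination measure for A's while-loop over the stack
def pvStackMeasure (stack : List (Int × List Int)) : Nat :=
  (stack.map (fun it => 8 ^ it.1.toNat)).sum

theorem pvParts_pos : ∀ l ∈ pvParts, 1 ≤ l := by decide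

theorem pvPushBound (c : Int) (comb : List Int) (hc : 0 < c) :
    ∀ (ls : List Int) (rest : List (Int × List Int)), (∀ l ∈ ls, 1 ≤ l) →
    pvStackMeasure (ls.foldl (pvPush c comb) rest)
      ≤ pvStackMeasure rest + ls.length * 8 ^ (c.toNat - 1) := by
  intro ls
  induction ls with
  | nil => intro rest _; simp
  | cons l ls ih =>
    intro rest hpos
    have h1 : 1 ≤ l := hpos l (List.mem_cons_self ..)
    have step : pvStackMeasure (pvPush c comb rest l)
        ≤ pvStackMeasure rest + 8 ^ (c.toNat - 1) := by
      by_cases hlc : l ≤ c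
      · have ht : (c - l).toNat ≤ c.toNat - 1 := by omega
        have hp := Nat.pow_le_pow_right (show 1 ≤ 8 by norm_num) ht
        simp only [pvPush, if_pos hlc, pvStackMeasure, List.map_cons, List.sum_cons]
        omega
      · simp [pvPush, hlc]
    have := ih (pvPush c comb rest l) (fun x hx => hpos x (List.mem_cons_of_mem _ hx))
    simp only [List.foldl_cons, List.length_cons, Nat.succ_mul] at *
    omega

theorem pvPushNeg (c : Int) (comb : List Int) (hc : c < 0) :
    ∀ (ls : List Int) (rest : List (Int × List Int)), (∀ l ∈ ls, 1 ≤ l) →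
    ls.foldl (pvPush c comb) rest = rest := by
  intro ls
  induction ls with
  | nil => intro rest _; rfl
  | cons l ls ih =>
    intro rest hpos
    have h1 : 1 ≤ l := hpos l (List.mem_cons_self ..)
    have hlc : ¬ l ≤ c := by omega
    simpa [pvPush, hlc] using ih rest (fun x hx => hpos x (List.mem_cons_of_mem _ hx))

theorem pvPushLt (c : Int) (comb : List Int) (hc : c ≠ 0) (rest : List (Int × List Int)) :
    pvStackMeasure (pvParts.foldl (pvPush c comb) rest) < 8 ^ c.toNat + pvStackMeasure rest := by
  rcases lt_or_gt_of_ne hc with hneg | hpos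
  · rw [pvPushNeg c comb hneg pvParts rest pvParts_pos]
    have : 1 ≤ 8 ^ c.toNat := Nat.one_le_pow _ _ (by norm_num)
    omega
  · have hb := pvPushBound c comb hpos pvParts rest pvParts_pos
    have hk : c.toNat - 1 + 1 = c.toNat := by omega
    have h8 := pow_succ' 8 (c.toNat - 1)
    rw [hk] at h8
    rw [show pvParts.length = 7 from rfl] at hb
    have hb1 : 1 ≤ 8 ^ (c.toNat - 1) := Nat.one_le_pow _ _ (by norm_num)
    omega

-- A's while-loop.  The Lean list holds Python's stack reversed: the HEAD is the top
-- (`stack.pop()` pops Python's END) and `stack.append(x)` is `x :: ·`.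
def pvLoopA : List (Int × List Int) → PySem.Set (List Int) → PySem.Set (List Int)
  | [], acc => acc
  | (c, comb) :: rest, acc =>
    if c = 0 then
      pvLoopA rest (PySem.Set.add acc (pySelectionSort comb))
    else
      pvLoopA (pvParts.foldl (pvPush c comb) rest) acc
termination_by stack => pvStackMeasure stack
decreasing_by
  · have : 1 ≤ 8 ^ c.toNat := Nat.one_le_pow _ _ (by norm_num)
    simp only [pvStackMeasure, List.map_cons, List.sum_cons]
    omega
  · have := pvPushLt c comb (by assumption) rest
    simp only [pvStackMeasure, List.map_cons, List.sum_cons] at this ⊢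
    omega

def find_permutations_iteratively (target_length : Int) : List (List Int) :=
  pvLoopA [(target_length, [])] PySem.Set.empty

-- ===== PORT B =====
-- `parts` of B
def pvPartsAsc : List Int := [1, 2, 4, 6, 8, 10, 12]

theorem pvPartsAsc_pos : ∀ l ∈ pvPartsAsc, 1 ≤ l := by decide

-- B's `gen(remaining, min_part)`; `attach` only carries the membership fact needed for
-- termination, the iteration is exactly `for p in parts: if min_part <= p <= remaining: …`
def pvGen (c m : Int) : List (List Int) :=
  if _hc : c = 0 then [[]]
  else pvPartsAsc.attach.flatMap
    (fun l => if h : m ≤ l.1 ∧ l.1 ≤ c then (pvGen (c - l.1) l.1).map (l.1 :: ·) else [])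
termination_by c.toNat
decreasing_by have h1 := pvPartsAsc_pos _ l.2; omega

def find_permutations_iteratively_alt (target_length : Int) : List (List Int) :=
  PySem.Set.ofList (pvGen target_length 1)

-- ===== PRECONDITION & SPEC =====
def Spec_find_permutations_iteratively (target_length : Int) (out : List (List Int)) : Prop := out = find_permutations_iteratively_alt target_length
instance (target_length : Int) (out : List (List Int)) : Decidable (Spec_find_permutations_iteratively target_length out) := by unfold Spec_find_permutations_iteratively; infer_instance

-- ===== CLAIM (what is proved, stated in full; the proofs are below) =====
def Claim_equal_find_permutations_iteratively : Prop := ∀ (target_length : Int), Dom_find_permutations_iteratively target_length → Spec_find_permutations_iteratively target_length (find_permutations_iteratively target_length)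

-- ===== LEMMAS AND PROOFS =====

-- two sorted lists with the same elements are equal
theorem pvSortedEq {l₁ l₂ : List Int} (h : l₁.Perm l₂)
    (s1 : l₁.Pairwise (· ≤ ·)) (s2 : l₂.Pairwise (· ≤ ·)) : l₁ = l₂ :=
  List.Perm.eq_of_pairwise (fun a b _ _ hab hba => le_antisymm hab hba) s1 s2 h

-- proof-side name for "the ascending reordering" (A computes it by selection sort,
-- B produces its lists already ascending)
def pvMsort (l : List Int) : List Int := List.insertionSort (· ≤ ·) l

def pvInsort (a : Int) (l : List Int) : List Int := List.orderedInsert (· ≤ ·) a l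

theorem pvMsort_pairwise (l : List Int) : (pvMsort l).Pairwise (· ≤ ·) :=
  List.pairwise_insertionSort _ l

theorem pvMsort_perm (l : List Int) : (pvMsort l).Perm l := List.perm_insertionSort _ l

theorem pvMsort_eq_self {l : List Int} (h : l.Pairwise (· ≤ ·)) : pvMsort l = l :=
  List.Pairwise.insertionSort_eq h

theorem pvMsort_cons (a : Int) (l : List Int) : pvMsort (a :: l) = pvInsort a (pvMsort l) := rfl

theorem pvInsort_perm (a : Int) (l : List Int) : (pvInsort a l).Perm (a :: l) :=
  List.perm_orderedInsert _ a l

theorem pvInsort_pairwise (a : Int) {l : List Int} (h : l.Pairwise (· ≤ ·)) :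
    (pvInsort a l).Pairwise (· ≤ ·) := List.Pairwise.orderedInsert a l h

theorem pvInsort_of_le (a : Int) (l : List Int) (h : ∀ x ∈ l, a ≤ x) :
    pvInsort a l = a :: l := by
  cases l with
  | nil => rfl
  | cons b t => simp [pvInsort, List.orderedInsert, h b (List.mem_cons_self ..)]

theorem pvInsort_inj {a : Int} {p q : List Int} (hp : p.Pairwise (· ≤ ·))
    (hq : q.Pairwise (· ≤ ·)) (h : pvInsort a p = pvInsort a q) : p = q := by
  have hperm : (a :: p).Perm (a :: q) :=
    ((pvInsort_perm a p).symm.trans (h ▸ pvInsort_perm a q))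
  exact pvSortedEq hperm.cons_inv hp hq

-- ---------- selection sort returns the ascending reordering ----------

theorem pvMinFold (arr : List Int) :
    ∀ (js : List Nat) (mi : Nat), (∀ j ∈ js, j < arr.length) → mi < arr.length →
    ((js.foldl (fun mi j => if arr.getD j 0 < arr.getD mi 0 then j else mi) mi) = mi ∨
      (js.foldl (fun mi j => if arr.getD j 0 < arr.getD mi 0 then j else mi) mi) ∈ js) ∧
    arr.getD (js.foldl (fun mi j => if arr.getD j 0 < arr.getD mi 0 then j else mi) mi) 0
      ≤ arr.getD mi 0 ∧
    ∀ j ∈ js, arr.getD (js.foldl (fun mi j => if arr.getD j 0 < arr.getD mi 0 then j else mi) mi) 0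
      ≤ arr.getD j 0 := by
  intro js
  induction js with
  | nil => intro mi _ _; exact ⟨Or.inl rfl, le_refl _, by intro j hj; cases hj⟩
  | cons j js ih =>
    intro mi hjs hmi
    by_cases hlt : arr.getD j 0 < arr.getD mi 0
    · have := ih j (fun x hx => hjs x (List.mem_cons_of_mem _ hx)) (hjs j (List.mem_cons_self ..))
      obtain ⟨hmem, hle, hall⟩ := this
      simp only [List.foldl_cons, if_pos hlt]
      refine ⟨?_, ?_, ?_⟩
      · rcases hmem with h | h
        · exact Or.inr (by rw [h]; exact List.mem_cons_self ..)
        · exact Or.inr (List.mem_cons_of_mem _ h)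
      · exact le_trans hle (le_of_lt hlt)
      · intro j' hj'
        rcases List.mem_cons.mp hj' with rfl | hj'
        · exact hle
        · exact hall j' hj'
    · have := ih mi (fun x hx => hjs x (List.mem_cons_of_mem _ hx)) hmi
      obtain ⟨hmem, hle, hall⟩ := this
      simp only [List.foldl_cons, if_neg hlt]
      refine ⟨hmem.imp id (List.mem_cons_of_mem _), hle, ?_⟩
      intro j' hj'
      rcases List.mem_cons.mp hj' with rfl | hj'
      · exact le_trans hle (le_of_not_gt hlt)
      · exact hall j' hj'

theorem pvMinIdx_spec (arr : List Int) (i : Nat) (h : i < arr.length) :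
    i ≤ pvMinIdx arr i ∧ pvMinIdx arr i < arr.length ∧
    ∀ k, i ≤ k → k < arr.length → arr.getD (pvMinIdx arr i) 0 ≤ arr.getD k 0 := by
  have hjs : ∀ j ∈ List.range' (i + 1) (arr.length - (i + 1)), j < arr.length := by
    intro j hj
    rw [List.mem_range'] at hj
    obtain ⟨t, ht, rfl⟩ := hj
    omega
  have hrange : ∀ j ∈ List.range' (i + 1) (arr.length - (i + 1)), i + 1 ≤ j := by
    intro j hj
    rw [List.mem_range'] at hj
    obtain ⟨t, ht, rfl⟩ := hj
    omega
  obtain ⟨hmem, hle, hall⟩ := pvMinFold arr (List.range' (i + 1) (arr.length - (i + 1))) i hjs h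
  unfold pvMinIdx
  refine ⟨?_, ?_, ?_⟩
  · rcases hmem with heq | hin
    · omega
    · have := hrange _ hin; omega
  · rcases hmem with heq | hin
    · omega
    · exact hjs _ hin
  · intro k hik hk
    rcases Nat.eq_or_lt_of_le hik with rfl | hik
    · exact hle
    · refine hall k ?_
      rw [List.mem_range']
      exact ⟨k - (i + 1), by omega, by omega⟩

theorem pvCountSet (l : List Int) (k : Nat) (hk : k < l.length) (b x : Int) :
    (l.set k b).count x + (if l[k] = x then 1 else 0)
      = l.count x + (if b = x then 1 else 0) := by
  conv_rhs => rw [← List.take_append_drop k l, ← List.getElem_cons_drop hk]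
  rw [List.set_eq_take_cons_drop _ hk]
  simp only [List.count_append, List.count_cons, beq_iff_eq]
  split_ifs <;> omega

theorem pvSwap_self (arr : List Int) (j : Nat) (hj : j < arr.length) :
    pvSwap arr j j = arr := by
  unfold pvSwap
  rw [List.getD_eq_getElem _ _ hj, List.set_set, List.set_getElem_self]

theorem pvSwap_count (arr : List Int) (i j : Nat) (hi : i < arr.length)
    (hj : j < arr.length) (x : Int) : (pvSwap arr i j).count x = arr.count x := by
  by_cases hij : i = j
  · subst hij; rw [pvSwap_self arr i hi]
  · have h1 := pvCountSet arr i hi (arr[j]) x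
    have hj' : j < (arr.set i arr[j]).length := by simpa using hj
    have h2 := pvCountSet (arr.set i arr[j]) j hj' (arr[i]) x
    rw [List.getElem_set_ne hij] at h2
    unfold pvSwap
    rw [List.getD_eq_getElem _ _ hj, List.getD_eq_getElem _ _ hi]
    split_ifs at h1 h2 <;> omega

theorem pvSwap_perm (arr : List Int) (i j : Nat) (hi : i < arr.length)
    (hj : j < arr.length) : (pvSwap arr i j).Perm arr :=
  List.perm_iff_count.mpr (fun x => pvSwap_count arr i j hi hj x)

theorem pvTakeSet (l : List Int) (k m : Nat) (hmk : m ≤ k) (b : Int) :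
    (l.set k b).take m = l.take m := by
  apply List.ext_getElem
  · simp
  · intro n h1 h2
    simp only [List.length_take, List.length_set] at h1 h2
    rw [List.getElem_take, List.getElem_take, List.getElem_set_ne (by omega)]

theorem pvSwap_take (arr : List Int) (i j : Nat) (hij : i ≤ j) :
    (pvSwap arr i j).take i = arr.take i := by
  unfold pvSwap
  rw [pvTakeSet _ _ _ hij, pvTakeSet _ _ _ le_rfl]

theorem pvSwap_getElem_i (arr : List Int) (i j : Nat) (hi : i < arr.length)
    (hj : j < arr.length) :
    (pvSwap arr i j)[i]'(by rw [pvSwap_length]; exact hi) = arr[j] := by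
  by_cases hij : i = j
  · subst hij
    have := pvSwap_self arr i hi
    simp [this]
  · unfold pvSwap
    rw [List.getElem_set_ne (show j ≠ i by omega), List.getElem_set_self]
    exact List.getD_eq_getElem arr 0 hj

theorem pvSelLoop_spec : ∀ (k : Nat) (arr : List Int) (i : Nat), arr.length - i ≤ k →
    (arr.take i).Pairwise (· ≤ ·) →
    (∀ x ∈ arr.take i, ∀ y ∈ arr.drop i, x ≤ y) →
    (pvSelLoop arr i).Perm arr ∧ (pvSelLoop arr i).Pairwise (· ≤ ·) := by
  intro k
  induction k with
  | zero =>
    intro arr i hk hs _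
    have hni : ¬ i < arr.length := by omega
    rw [pvSelLoop, dif_neg hni]
    rw [List.take_of_length_le (by omega)] at hs
    exact ⟨List.Perm.refl _, hs⟩
  | succ k ih =>
    intro arr i hk hs hxy
    by_cases h : i < arr.length
    · obtain ⟨hij, hjn, hmin⟩ := pvMinIdx_spec arr i h
      set j := pvMinIdx arr i with hjdef
      set sw := pvSwap arr i j with hswdef
      have hlen : sw.length = arr.length := pvSwap_length arr i j
      have hperm : sw.Perm arr := pvSwap_perm arr i j h hjn
      have htake : sw.take i = arr.take i := pvSwap_take arr i j hij
      have hi' : i < sw.length := by omega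
      have hswi : sw[i]'hi' = arr[j] := pvSwap_getElem_i arr i j h hjn
      have hdropperm : (sw.drop i).Perm (arr.drop i) := by
        have h1 := List.take_append_drop i sw
        have h2 := List.take_append_drop i arr
        rw [← h1, ← h2, htake] at hperm
        exact (List.perm_append_left_iff _).mp hperm
      have hjmem : arr[j] ∈ arr.drop i := by
        have hlt : j - i < (arr.drop i).length := by simp; omega
        have : (arr.drop i)[j - i]'hlt = arr[j] := by
          rw [List.getElem_drop]; congr 1; omega
        exact this ▸ List.getElem_mem hlt
      have hminmem : ∀ y ∈ arr.drop i, arr[j] ≤ y := by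
        intro y hy
        obtain ⟨t, ht, hty⟩ := List.mem_iff_getElem.mp hy
        have hins : (arr.drop i)[t]'ht = arr[i + t]'(by simp at ht; omega) :=
          List.getElem_drop
        have := hmin (i + t) (by omega) (by simp at ht; omega)
        rw [List.getD_eq_getElem _ _ hjn, List.getD_eq_getElem _ _ (by simp at ht; omega)] at this
        rw [← hty, hins]
        exact this
      have htake1 : sw.take (i + 1) = arr.take i ++ [arr[j]] := by
        rw [List.take_add_one, htake, List.getElem?_eq_getElem hi', hswi]
        rfl
      have hsort1 : (sw.take (i + 1)).Pairwise (· ≤ ·) := by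
        rw [htake1, List.pairwise_append]
        refine ⟨hs, List.pairwise_singleton _ _, ?_⟩
        intro x hx y hy
        rw [List.mem_singleton] at hy
        subst hy
        exact hxy x hx _ hjmem
      have hpresuf : ∀ x ∈ sw.take (i + 1), ∀ y ∈ sw.drop (i + 1), x ≤ y := by
        intro x hx y hy
        have hyd : y ∈ arr.drop i := by
          have hcons : sw[i]'hi' :: sw.drop (i + 1) = sw.drop i := List.getElem_cons_drop hi'
          have : y ∈ sw.drop i := by rw [← hcons]; exact List.mem_cons_of_mem _ hy
          exact hdropperm.subset this
        rw [htake1] at hx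
        rcases List.mem_append.mp hx with hx | hx
        · exact hxy x hx y hyd
        · rw [List.mem_singleton] at hx
          subst hx
          exact hminmem y hyd
      have hrec := ih sw (i + 1) (by omega) hsort1 hpresuf
      rw [pvSelLoop, dif_pos h]
      exact ⟨hrec.1.trans hperm, hrec.2⟩
    · rw [pvSelLoop, dif_neg h]
      rw [List.take_of_length_le (by omega)] at hs
      exact ⟨List.Perm.refl _, hs⟩

theorem pvSelectionSort_eq (l : List Int) : pySelectionSort l = pvMsort l := by
  have h := pvSelLoop_spec l.length l 0 (by omega) (by simp) (by simp)
  exact pvSortedEq (h.1.trans (pvMsort_perm l).symm) h.2 (pvMsort_pairwise l)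

-- ---------- generic list helpers ----------

theorem pvFlatMapAttach {α β : Type} (l : List α) (f : α → List β) :
    l.attach.flatMap (fun x => f x.1) = l.flatMap f := by
  conv_rhs => rw [← List.attach_map_subtype_val l]
  rw [List.flatMap_map]

theorem pvFlatMapIte {α β : Type} (l : List α) (p : α → Prop) [DecidablePred p]
    (f : α → List β) :
    l.flatMap (fun x => if p x then f x else []) = (l.filter (fun x => decide (p x))).flatMap f := by
  induction l with
  | nil => rfl
  | cons x xs ih => by_cases h : p x <;> simp [h, ih]

theorem pvFilterFlatMap {α β : Type} (l : List α) (g : α → List β) (p : β → Bool) :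
    (l.flatMap g).filter p = l.flatMap (fun x => (g x).filter p) := by
  induction l with
  | nil => rfl
  | cons x xs ih => simp [List.filter_append, ih]

theorem pvSumPos : ∀ (w : List Int), (∀ x ∈ w, 1 ≤ x) → 0 ≤ w.sum ∧ (w ≠ [] → 1 ≤ w.sum) := by
  intro w
  induction w with
  | nil => intro _; simp
  | cons x t ih =>
    intro h
    have hx := h x (List.mem_cons_self ..)
    have ht := ih (fun y hy => h y (List.mem_cons_of_mem _ hy))
    simp only [List.sum_cons]
    constructor
    · omega
    · intro _; omega

theorem pvElemLeSum : ∀ (w : List Int), (∀ x ∈ w, 1 ≤ x) → ∀ a ∈ w, a ≤ w.sum := by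
  intro w
  induction w with
  | nil => intro _ a ha; cases ha
  | cons x t ih =>
    intro h a ha
    have ht := pvSumPos t (fun y hy => h y (List.mem_cons_of_mem _ hy))
    rcases List.mem_cons.mp ha with rfl | ha
    · simp only [List.sum_cons]; omega
    · have := ih (fun y hy => h y (List.mem_cons_of_mem _ hy)) a ha
      have hx := h x (List.mem_cons_self ..)
      simp only [List.sum_cons]; omega

-- ---------- unfolding equations for the recursive definitions ----------

-- compositions (ordered sequences) of c over the allowed parts, in A's traversal order
def pvComps (c : Int) : List (List Int) :=
  if _hc : c = 0 then [[]]
  else ((pvPartsAsc.filter (fun l => decide (l ≤ c))).attach).flatMap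
    (fun l => (pvComps (c - l.1)).map (l.1 :: ·))
termination_by c.toNat
decreasing_by
  have hmem := l.2
  rw [List.mem_filter] at hmem
  have h1 := pvPartsAsc_pos _ hmem.1
  have h2 : l.1 ≤ c := by simpa using hmem.2
  omega

-- the finished (sorted) combinations A's loop adds to its set, in insertion order
def pvEmit (c : Int) (comb : List Int) : List (List Int) :=
  if _hc : c = 0 then [pySelectionSort comb]
  else ((pvPartsAsc.filter (fun l => decide (l ≤ c))).attach).flatMap
    (fun l => pvEmit (c - l.1) (comb ++ [l.1]))
termination_by c.toNat
decreasing_by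
  have hmem := l.2
  rw [List.mem_filter] at hmem
  have h1 := pvPartsAsc_pos _ hmem.1
  have h2 : l.1 ≤ c := by simpa using hmem.2
  omega

-- first occurrences, in order, of the elements of a list that are not in `seen`
def pvFresh (seen : List (List Int)) : List (List Int) → List (List Int)
  | [] => []
  | x :: xs => if x ∈ seen then pvFresh seen xs else x :: pvFresh (x :: seen) xs

theorem pvComps_zero : pvComps 0 = [[]] := by rw [pvComps]; simp

theorem pvComps_ne {c : Int} (hc : c ≠ 0) :
    pvComps c = (pvPartsAsc.filter (fun l => decide (l ≤ c))).flatMap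
      (fun l => (pvComps (c - l)).map (l :: ·)) := by
  rw [pvComps, dif_neg hc]
  exact pvFlatMapAttach _ (fun l => (pvComps (c - l)).map (l :: ·))

theorem pvEmit_zero (comb : List Int) : pvEmit 0 comb = [pySelectionSort comb] := by
  rw [pvEmit]; simp

theorem pvEmit_ne {c : Int} (hc : c ≠ 0) (comb : List Int) :
    pvEmit c comb = (pvPartsAsc.filter (fun l => decide (l ≤ c))).flatMap
      (fun l => pvEmit (c - l) (comb ++ [l])) := by
  rw [pvEmit, dif_neg hc]
  exact pvFlatMapAttach _ (fun l => pvEmit (c - l) (comb ++ [l]))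

theorem pvGen_zero (m : Int) : pvGen 0 m = [[]] := by rw [pvGen]; simp

theorem pvGen_ne {c : Int} (hc : c ≠ 0) (m : Int) :
    pvGen c m = (pvPartsAsc.filter (fun l => decide (m ≤ l ∧ l ≤ c))).flatMap
      (fun l => (pvGen (c - l) l).map (l :: ·)) := by
  rw [pvGen, dif_neg hc]
  exact (pvFlatMapAttach pvPartsAsc
      (fun l => if m ≤ l ∧ l ≤ c then (pvGen (c - l) l).map (l :: ·) else [])).trans
    (pvFlatMapIte pvPartsAsc (fun l => m ≤ l ∧ l ≤ c)
      (fun l => (pvGen (c - l) l).map (l :: ·)))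

theorem pvFilterNeg {c : Int} (hc : c < 0) :
    pvPartsAsc.filter (fun l => decide (l ≤ c)) = [] := by
  apply List.filter_eq_nil_iff.mpr
  intro x hx
  have := pvPartsAsc_pos x hx
  simp only [decide_eq_true_eq]
  omega

theorem pvCompsNeg {c : Int} (hc : c < 0) : pvComps c = [] := by
  rw [pvComps_ne (by omega), pvFilterNeg hc]
  rfl

theorem pvGenNeg {c : Int} (hc : c < 0) (m : Int) : pvGen c m = [] := by
  rw [pvGen_ne (by omega) m]
  have : pvPartsAsc.filter (fun l => decide (m ≤ l ∧ l ≤ c)) = [] := by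
    apply List.filter_eq_nil_iff.mpr
    intro x hx
    have := pvPartsAsc_pos x hx
    simp only [decide_eq_true_eq]
    omega
  rw [this]
  rfl

-- ---------- A's loop produces exactly the pvEmit stream, folded into the set ----------

theorem pvPushShape (c : Int) (comb : List Int) :
    ∀ (ls : List Int) (rest : List (Int × List Int)),
    ls.foldl (pvPush c comb) rest
      = ((ls.filter (fun l => decide (l ≤ c))).reverse.map (fun l => (c - l, comb ++ [l]))) ++ rest := by
  intro ls
  induction ls with
  | nil => intro rest; rfl
  | cons l ls ih =>
    intro rest
    by_cases h : l ≤ c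
    · rw [List.foldl_cons, show pvPush c comb rest l = (c - l, comb ++ [l]) :: rest from by
        simp [pvPush, h], ih]
      simp [h]
    · rw [List.foldl_cons, show pvPush c comb rest l = rest from by
        simp [pvPush, h], ih]
      simp [h]

theorem pvLoopA_emit : ∀ (n : Nat) (stack : List (Int × List Int)) (acc : PySem.Set (List Int)),
    pvStackMeasure stack ≤ n →
    pvLoopA stack acc = (stack.flatMap (fun it => pvEmit it.1 it.2)).foldl PySem.Set.add acc := by
  intro n
  induction n with
  | zero =>
    intro stack acc h
    cases stack with
    | nil => rw [pvLoopA]; rfl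
    | cons hd tl =>
      exfalso
      obtain ⟨c, comb⟩ := hd
      have : 1 ≤ 8 ^ c.toNat := Nat.one_le_pow _ _ (by norm_num)
      simp only [pvStackMeasure, List.map_cons, List.sum_cons] at h
      omega
  | succ n ih =>
    intro stack acc h
    cases stack with
    | nil => rw [pvLoopA]; rfl
    | cons hd tl =>
      obtain ⟨c, comb⟩ := hd
      have hm : pvStackMeasure ((c, comb) :: tl) = 8 ^ c.toNat + pvStackMeasure tl := by
        simp [pvStackMeasure]
      by_cases hc : c = 0
      · subst hc
        rw [pvLoopA, if_pos rfl]
        rw [ih tl (PySem.Set.add acc (pySelectionSort comb)) (by simp [pvStackMeasure] at h ⊢; omega)]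
        rw [List.flatMap_cons, pvEmit_zero, List.foldl_append]
        rfl
      · rw [pvLoopA, if_neg hc]
        have hlt := pvPushLt c comb hc tl
        rw [ih (pvParts.foldl (pvPush c comb) tl) acc (by omega)]
        rw [pvPushShape c comb pvParts tl]
        rw [List.flatMap_append]
        conv_rhs => rw [List.flatMap_cons]
        rw [pvEmit_ne hc comb]
        rw [← List.filter_reverse, show pvParts.reverse = pvPartsAsc from rfl]
        rw [List.flatMap_map]

-- ---------- fold of Set.add = append of the fresh elements ----------

theorem pvFresh_congr : ∀ (L s₁ s₂ : List (List Int)), (∀ q, q ∈ s₁ ↔ q ∈ s₂) →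
    pvFresh s₁ L = pvFresh s₂ L := by
  intro L
  induction L with
  | nil => intro _ _ _; rfl
  | cons x xs ih =>
    intro s₁ s₂ hs
    by_cases hx : x ∈ s₁
    · rw [pvFresh, if_pos hx, pvFresh, if_pos ((hs x).mp hx)]
      exact ih s₁ s₂ hs
    · rw [pvFresh, if_neg hx, pvFresh, if_neg (fun h => hx ((hs x).mpr h))]
      congr 1
      apply ih
      intro q
      simp only [List.mem_cons]
      rw [hs q]

theorem pvFresh_mem : ∀ (L s : List (List Int)) (q : List Int),
    q ∈ pvFresh s L ↔ (q ∈ L ∧ q ∉ s) := by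
  intro L
  induction L with
  | nil => intro s q; simp [pvFresh]
  | cons x xs ih =>
    intro s q
    by_cases hx : x ∈ s
    · rw [pvFresh, if_pos hx, ih]
      constructor
      · rintro ⟨h1, h2⟩; exact ⟨List.mem_cons_of_mem _ h1, h2⟩
      · rintro ⟨h1, h2⟩
        rcases List.mem_cons.mp h1 with rfl | h1
        · exact absurd hx h2
        · exact ⟨h1, h2⟩
    · rw [pvFresh, if_neg hx]
      constructor
      · intro hq
        rcases List.mem_cons.mp hq with rfl | hq
        · exact ⟨List.mem_cons_self .., hx⟩
        · obtain ⟨h1, h2⟩ := (ih (x :: s) q).mp hq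
          exact ⟨List.mem_cons_of_mem _ h1, fun h => h2 (List.mem_cons_of_mem _ h)⟩
      · rintro ⟨h1, h2⟩
        rcases List.mem_cons.mp h1 with rfl | h1
        · exact List.mem_cons_self ..
        · by_cases hqx : q = x
          · subst hqx; exact List.mem_cons_self ..
          · exact List.mem_cons_of_mem _ ((ih (x :: s) q).mpr
              ⟨h1, by simp only [List.mem_cons]; tauto⟩)

theorem pvFresh_nodup : ∀ (L s : List (List Int)), (pvFresh s L).Nodup := by
  intro L
  induction L with
  | nil => intro s; exact List.nodup_nil
  | cons x xs ih =>
    intro s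
    by_cases hx : x ∈ s
    · rw [pvFresh, if_pos hx]; exact ih s
    · rw [pvFresh, if_neg hx]
      refine List.Nodup.cons ?_ (ih (x :: s))
      intro hmem
      exact ((pvFresh_mem xs (x :: s) x).mp hmem).2 (List.mem_cons_self ..)

theorem pvFresh_id : ∀ (L s : List (List Int)), (∀ x ∈ L, x ∉ s) → L.Nodup →
    pvFresh s L = L := by
  intro L
  induction L with
  | nil => intro _ _ _; rfl
  | cons x xs ih =>
    intro s hdisj hnd
    rw [pvFresh, if_neg (hdisj x (List.mem_cons_self ..))]
    congr 1
    apply ih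
    · intro y hy
      simp only [List.mem_cons]
      rintro (rfl | hys)
      · exact (List.nodup_cons.mp hnd).1 hy
      · exact hdisj y (List.mem_cons_of_mem _ hy) hys
    · exact (List.nodup_cons.mp hnd).2

theorem pvFoldAdd : ∀ (L : List (List Int)) (s : PySem.Set (List Int)),
    L.foldl PySem.Set.add s = s ++ pvFresh s L := by
  intro L
  induction L with
  | nil => intro s; simp [pvFresh]
  | cons x xs ih =>
    intro s
    rw [List.foldl_cons, ih]
    by_cases hx : x ∈ s
    · have : PySem.Set.add s x = s := by
        simp [PySem.Set.add, PySem.Set.contains, hx]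
      rw [this, pvFresh, if_pos hx]
    · have : PySem.Set.add s x = s ++ [x] := by
        simp [PySem.Set.add, PySem.Set.contains, hx]
      rw [this, pvFresh, if_neg hx, List.append_assoc, List.singleton_append]
      congr 2
      apply pvFresh_congr
      intro q
      simp [List.mem_append, List.mem_cons, or_comm]

theorem pvFresh_append : ∀ (X Y s s' : List (List Int)),
    (∀ q, q ∈ s' ↔ q ∈ X ∨ q ∈ s) →
    pvFresh s (X ++ Y) = pvFresh s X ++ pvFresh s' Y := by
  intro X
  induction X with
  | nil =>
    intro Y s s' hs
    rw [List.nil_append, pvFresh]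
    exact (pvFresh_congr Y s' s (by intro q; rw [hs q]; simp)).symm
  | cons x X' ih =>
    intro Y s s' hs
    by_cases hx : x ∈ s
    · rw [List.cons_append, pvFresh, if_pos hx, pvFresh, if_pos hx]
      apply ih
      intro q
      rw [hs q]
      simp only [List.mem_cons]
      constructor
      · rintro ((rfl | h) | h)
        · exact Or.inr hx
        · exact Or.inl h
        · exact Or.inr h
      · tauto
    · rw [List.cons_append, pvFresh, if_neg hx, pvFresh, if_neg hx, List.cons_append]
      congr 1
      apply ih
      intro q
      rw [hs q]
      simp only [List.mem_cons]
      tauto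

theorem pvFresh_union : ∀ (L u v : List (List Int)),
    pvFresh (u ++ v) L = (pvFresh v L).filter (fun q => decide (q ∉ u)) := by
  intro L
  induction L with
  | nil => intro u v; rfl
  | cons x xs ih =>
    intro u v
    by_cases hv : x ∈ v
    · rw [pvFresh, if_pos (List.mem_append.mpr (Or.inr hv)), pvFresh, if_pos hv, ih]
    · by_cases hu : x ∈ u
      · rw [pvFresh, if_pos (List.mem_append.mpr (Or.inl hu)), pvFresh, if_neg hv]
        rw [List.filter_cons, if_neg (by simp [hu])]
        rw [pvFresh_congr xs (u ++ v) (u ++ (x :: v)) (by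
          intro q
          simp only [List.mem_append, List.mem_cons]
          constructor
          · rintro (h | h)
            · exact Or.inl h
            · exact Or.inr (Or.inr h)
          · rintro (h | rfl | h)
            · exact Or.inl h
            · exact Or.inl hu
            · exact Or.inr h)]
        exact ih u (x :: v)
      · rw [pvFresh, if_neg (by simp only [List.mem_append]; tauto), pvFresh, if_neg hv]
        rw [List.filter_cons, if_pos (by simp [hu])]
        congr 1
        rw [pvFresh_congr xs (x :: (u ++ v)) (u ++ (x :: v)) (by intro q; simp [List.mem_cons]; tauto)]
        exact ih u (x :: v)

theorem pvFresh_filter (L s : List (List Int)) :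
    pvFresh s L = (pvFresh [] L).filter (fun q => decide (q ∉ s)) := by
  have := pvFresh_union L s []
  rw [List.append_nil] at this
  exact this

theorem pvFresh_map (f : List Int → List Int) : ∀ (X s s' : List (List Int)),
    (∀ a ∈ X, ∀ b ∈ X, f a = f b → a = b) →
    (∀ x ∈ X, (f x ∈ s ↔ x ∈ s')) →
    pvFresh s (X.map f) = (pvFresh s' X).map f := by
  intro X
  induction X with
  | nil => intro s s' _ _; rfl
  | cons x xs ih =>
    intro s s' hinj hmem
    have hx := hmem x (List.mem_cons_self ..)
    by_cases hxs : x ∈ s'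
    · rw [List.map_cons, pvFresh, if_pos (hx.mpr hxs), pvFresh, if_pos hxs]
      exact ih s s' (fun a ha b hb => hinj a (List.mem_cons_of_mem _ ha) b (List.mem_cons_of_mem _ hb))
        (fun y hy => hmem y (List.mem_cons_of_mem _ hy))
    · rw [List.map_cons, pvFresh, if_neg (fun h => hxs (hx.mp h)), pvFresh, if_neg hxs,
        List.map_cons]
      congr 1
      apply ih
      · exact fun a ha b hb => hinj a (List.mem_cons_of_mem _ ha) b (List.mem_cons_of_mem _ hb)
      · intro y hy
        simp only [List.mem_cons]
        constructor
        · rintro (hfy | hfy)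
          · exact Or.inl (hinj y (List.mem_cons_of_mem _ hy) x (List.mem_cons_self ..) hfy)
          · exact Or.inr ((hmem y (List.mem_cons_of_mem _ hy)).mp hfy)
        · rintro (rfl | hys)
          · exact Or.inl rfl
          · exact Or.inr ((hmem y (List.mem_cons_of_mem _ hy)).mpr hys)

-- ---------- membership characterisations ----------

theorem pvCompsMem : ∀ (c : Int) (w : List Int),
    w ∈ pvComps c ↔ ((∀ x ∈ w, x ∈ pvPartsAsc) ∧ w.sum = c) := by
  suffices H : ∀ (n : Nat) (c : Int), c.toNat = n → ∀ (w : List Int),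
      w ∈ pvComps c ↔ ((∀ x ∈ w, x ∈ pvPartsAsc) ∧ w.sum = c) by
    intro c w; exact H c.toNat c rfl w
  intro n
  induction n using Nat.strong_induction_on with
  | _ n ih =>
    intro c hn w
    by_cases hc : c = 0
    · subst hc
      rw [pvComps_zero]
      constructor
      · intro hw
        rw [List.mem_singleton] at hw
        subst hw
        exact ⟨(by intro x hx; cases hx), rfl⟩
      · rintro ⟨hall, hsum⟩
        cases w with
        | nil => exact List.mem_singleton.mpr rfl
        | cons x t =>
          exfalso
          have hx := pvPartsAsc_pos x (hall x (List.mem_cons_self ..))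
          have ht := pvSumPos t (fun y hy => pvPartsAsc_pos y (hall y (List.mem_cons_of_mem _ hy)))
          simp only [List.sum_cons] at hsum
          omega
    · rcases lt_or_gt_of_ne hc with hneg | hpos
      · rw [pvCompsNeg hneg]
        constructor
        · intro hw; cases hw
        · rintro ⟨hall, hsum⟩
          have := pvSumPos w (fun y hy => pvPartsAsc_pos y (hall y hy))
          omega
      · rw [pvComps_ne hc]
        simp only [List.mem_flatMap, List.mem_filter, List.mem_map, decide_eq_true_eq]
        constructor
        · rintro ⟨l, ⟨hl, hlc⟩, a, ha, rfl⟩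
          have hl1 := pvPartsAsc_pos l hl
          have := (ih (c - l).toNat (by omega) (c - l) rfl a).mp ha
          refine ⟨?_, ?_⟩
          · intro x hx
            rcases List.mem_cons.mp hx with rfl | hx
            · exact hl
            · exact this.1 x hx
          · simp only [List.sum_cons]
            omega
        · rintro ⟨hall, hsum⟩
          cases w with
          | nil => simp at hsum; omega
          | cons x t =>
            have hx := hall x (List.mem_cons_self ..)
            have hx1 := pvPartsAsc_pos x hx
            have ht := pvSumPos t (fun y hy => pvPartsAsc_pos y (hall y (List.mem_cons_of_mem _ hy)))
            simp only [List.sum_cons] at hsum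
            have hxc : x ≤ c := by omega
            refine ⟨x, ⟨hx, hxc⟩, t, ?_, rfl⟩
            exact (ih (c - x).toNat (by omega) (c - x) rfl t).mpr
              ⟨fun y hy => hall y (List.mem_cons_of_mem _ hy), by omega⟩

theorem pvGenMem : ∀ (c m : Int) (p : List Int),
    p ∈ pvGen c m ↔ (p.Pairwise (· ≤ ·) ∧ (∀ x ∈ p, x ∈ pvPartsAsc ∧ m ≤ x) ∧ p.sum = c) := by
  suffices H : ∀ (n : Nat) (c : Int), c.toNat = n → ∀ (m : Int) (p : List Int),
      p ∈ pvGen c m ↔ (p.Pairwise (· ≤ ·) ∧ (∀ x ∈ p, x ∈ pvPartsAsc ∧ m ≤ x) ∧ p.sum = c) by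
    intro c m p; exact H c.toNat c rfl m p
  intro n
  induction n using Nat.strong_induction_on with
  | _ n ih =>
    intro c hn m p
    by_cases hc : c = 0
    · subst hc
      rw [pvGen_zero]
      constructor
      · intro hp
        rw [List.mem_singleton] at hp
        subst hp
        exact ⟨List.Pairwise.nil, (by intro x hx; cases hx), rfl⟩
      · rintro ⟨_, hall, hsum⟩
        cases p with
        | nil => exact List.mem_singleton.mpr rfl
        | cons x t =>
          exfalso
          have hx := pvPartsAsc_pos x (hall x (List.mem_cons_self ..)).1
          have ht := pvSumPos t (fun y hy => pvPartsAsc_pos y (hall y (List.mem_cons_of_mem _ hy)).1)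
          simp only [List.sum_cons] at hsum
          omega
    · rcases lt_or_gt_of_ne hc with hneg | hpos
      · rw [pvGenNeg hneg]
        constructor
        · intro hp; cases hp
        · rintro ⟨_, hall, hsum⟩
          have := pvSumPos p (fun y hy => pvPartsAsc_pos y (hall y hy).1)
          omega
      · rw [pvGen_ne hc]
        simp only [List.mem_flatMap, List.mem_filter, List.mem_map, decide_eq_true_eq]
        constructor
        · rintro ⟨l, ⟨hl, hml, hlc⟩, q, hq, rfl⟩
          have hl1 := pvPartsAsc_pos l hl
          obtain ⟨hqs, hqm, hqsum⟩ := (ih (c - l).toNat (by omega) (c - l) rfl l q).mp hq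
          refine ⟨?_, ?_, ?_⟩
          · exact List.pairwise_cons.mpr ⟨fun y hy => (hqm y hy).2, hqs⟩
          · intro x hx
            rcases List.mem_cons.mp hx with rfl | hx
            · exact ⟨hl, hml⟩
            · exact ⟨(hqm x hx).1, le_trans hml (hqm x hx).2⟩
          · simp only [List.sum_cons]; omega
        · rintro ⟨hsort, hall, hsum⟩
          cases p with
          | nil => simp at hsum; omega
          | cons x t =>
            obtain ⟨hx, hmx⟩ := hall x (List.mem_cons_self ..)
            have hx1 := pvPartsAsc_pos x hx
            have ht := pvSumPos t (fun y hy => pvPartsAsc_pos y (hall y (List.mem_cons_of_mem _ hy)).1)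
            simp only [List.sum_cons] at hsum
            have hxc : x ≤ c := by omega
            obtain ⟨hhead, htail⟩ := List.pairwise_cons.mp hsort
            refine ⟨x, ⟨hx, hmx, hxc⟩, t, ?_, rfl⟩
            exact (ih (c - x).toNat (by omega) (c - x) rfl x t).mpr
              ⟨htail, fun y hy => ⟨(hall y (List.mem_cons_of_mem _ hy)).1, hhead y hy⟩, by omega⟩

-- the set of values A inserts: sorted lists over the parts with the right sum
theorem pvMMem (d : Int) (q : List Int) :
    q ∈ (pvComps d).map pvMsort ↔
      (q.Pairwise (· ≤ ·) ∧ (∀ x ∈ q, x ∈ pvPartsAsc) ∧ q.sum = d) := by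
  constructor
  · intro hq
    obtain ⟨w, hw, rfl⟩ := List.mem_map.mp hq
    obtain ⟨hall, hsum⟩ := (pvCompsMem d w).mp hw
    refine ⟨pvMsort_pairwise w, ?_, ?_⟩
    · intro x hx
      exact hall x ((pvMsort_perm w).subset hx)
    · rw [(pvMsort_perm w).sum_eq, hsum]
  · rintro ⟨hsort, hall, hsum⟩
    refine List.mem_map.mpr ⟨q, (pvCompsMem d q).mpr ⟨hall, hsum⟩, pvMsort_eq_self hsort⟩

theorem pvFlatMapCongr {α β : Type} (l : List α) (f g : α → List β)
    (h : ∀ x ∈ l, f x = g x) : l.flatMap f = l.flatMap g := by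
  induction l with
  | nil => rfl
  | cons x xs ih =>
    simp only [List.flatMap_cons, h x (List.mem_cons_self ..)]
    rw [ih (fun y hy => h y (List.mem_cons_of_mem _ hy))]

theorem pvGenFilter : ∀ (c m m' : Int), 1 ≤ m → m ≤ m' →
    (pvGen c m).filter (fun p => p.all (fun a => decide (m' ≤ a))) = pvGen c m' := by
  intro c m m' h1 hmm
  by_cases hc : c = 0
  · subst hc; rw [pvGen_zero, pvGen_zero]; rfl
  · rcases lt_or_gt_of_ne hc with hneg | hpos
    · rw [pvGenNeg hneg, pvGenNeg hneg]; rfl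
    · rw [pvGen_ne hc m, pvGen_ne hc m', pvFilterFlatMap]
      have hblocks : ∀ l ∈ pvPartsAsc.filter (fun l => decide (m ≤ l ∧ l ≤ c)),
          ((pvGen (c - l) l).map (l :: ·)).filter (fun p => p.all (fun a => decide (m' ≤ a)))
            = if m' ≤ l then (pvGen (c - l) l).map (l :: ·) else [] := by
        intro l _
        rw [List.filter_map]
        by_cases hml : m' ≤ l
        · rw [if_pos hml]
          congr 1
          apply List.filter_eq_self.mpr
          intro q hq
          obtain ⟨_, hqm, _⟩ := (pvGenMem (c - l) l q).mp hq
          simp only [Function.comp_apply, List.all_cons, Bool.and_eq_true, decide_eq_true_eq,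
            List.all_eq_true]
          exact ⟨hml, fun x hx => le_trans hml (hqm x hx).2⟩
        · rw [if_neg hml]
          have : (pvGen (c - l) l).filter
              ((fun p => p.all (fun a => decide (m' ≤ a))) ∘ (l :: ·)) = [] := by
            apply List.filter_eq_nil_iff.mpr
            intro q _
            simp only [Function.comp_apply, List.all_cons, Bool.and_eq_true, decide_eq_true_eq]
            intro hcon
            exact hml hcon.1
          rw [this, List.map_nil]
      rw [pvFlatMapCongr _ _ _ hblocks, pvFlatMapIte]
      congr 1
      rw [List.filter_filter]
      apply List.filter_congr
      intro x _
      by_cases hx1 : m' ≤ x <;> by_cases hx2 : x ≤ c <;>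
        simp [hx1, hx2] <;> omega

-- A's combinations, written sorted: the ones A emits in the block for part `l`
-- are exactly `insort l` of the sorted combinations for `c - l`.
theorem pvEmit_eq : ∀ (c : Int) (comb : List Int),
    pvEmit c comb = (pvComps c).map (fun w => pvMsort (comb ++ w)) := by
  suffices H : ∀ (n : Nat) (c : Int), c.toNat = n → ∀ (comb : List Int),
      pvEmit c comb = (pvComps c).map (fun w => pvMsort (comb ++ w)) by
    intro c comb; exact H c.toNat c rfl comb
  intro n
  induction n using Nat.strong_induction_on with
  | _ n ih =>
    intro c hn comb
    by_cases hc : c = 0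
    · subst hc
      rw [pvEmit_zero, pvComps_zero, List.map_singleton, List.append_nil, pvSelectionSort_eq]
    · rcases lt_or_gt_of_ne hc with hneg | hpos
      · rw [pvEmit_ne hc, pvCompsNeg hneg, pvFilterNeg hneg]
        rfl
      · rw [pvEmit_ne hc, pvComps_ne hc, List.map_flatMap]
        apply pvFlatMapCongr
        intro l hl
        rw [List.mem_filter] at hl
        have hl1 := pvPartsAsc_pos _ hl.1
        have hlc : l ≤ c := by simpa using hl.2
        rw [ih (c - l).toNat (by omega) (c - l) rfl (comb ++ [l]), List.map_map]
        apply List.map_congr_left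
        intro w _
        simp only [Function.comp_apply, List.append_assoc, List.singleton_append]

-- ---------- the deduplicated emission stream is exactly pvGen ----------

theorem pvBlocks (c : Int) (hc : 0 < c)
    (IH : ∀ d : Int, 0 ≤ d → d < c → pvFresh [] ((pvComps d).map pvMsort) = pvGen d 1) :
    ∀ (L : List Int) (m : Int) (seen : List (List Int)),
      L.Pairwise (· < ·) →
      (∀ l ∈ L, l ∈ pvPartsAsc ∧ m ≤ l ∧ l ≤ c) →
      1 ≤ m →
      (∀ x ∈ pvPartsAsc, m ≤ x → x ≤ c → x ∈ L) →
      (∀ q : List Int, q.Pairwise (· ≤ ·) → (∀ a ∈ q, a ∈ pvPartsAsc) → q.sum = c →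
        (q ∈ seen ↔ ∃ a ∈ q, a < m)) →
      pvFresh seen (L.flatMap (fun l => ((pvComps (c - l)).map pvMsort).map (pvInsort l)))
        = L.flatMap (fun l => (pvGen (c - l) l).map (l :: ·)) := by
  intro L
  induction L with
  | nil => intro m seen _ _ _ _ _; rfl
  | cons l L' ihL =>
    intro m seen hsort hmem h1m hcompl hseen
    obtain ⟨hlp, hml, hlc⟩ := hmem l (List.mem_cons_self ..)
    have hl1 : (1 : Int) ≤ l := pvPartsAsc_pos l hlp
    have hlt : ∀ x ∈ L', l < x := (List.pairwise_cons.mp hsort).1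
    have hd0 : (0 : Int) ≤ c - l := by omega
    have hdlt : c - l < c := by omega
    -- characterise membership in the block for l
    have hXmem : ∀ q : List Int,
        q ∈ ((pvComps (c - l)).map pvMsort).map (pvInsort l) ↔
        (q.Pairwise (· ≤ ·) ∧ (∀ a ∈ q, a ∈ pvPartsAsc) ∧ q.sum = c ∧ l ∈ q) := by
      intro q
      constructor
      · intro hq
        obtain ⟨p, hp, rfl⟩ := List.mem_map.mp hq
        obtain ⟨hps, hpm, hpsum⟩ := (pvMMem (c - l) p).mp hp
        have hperm := pvInsort_perm l p
        refine ⟨pvInsort_pairwise l hps, ?_, ?_, ?_⟩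
        · intro a ha
          rcases List.mem_cons.mp (hperm.subset ha) with rfl | ha
          · exact hlp
          · exact hpm a ha
        · rw [hperm.sum_eq, List.sum_cons, hpsum]; omega
        · exact hperm.symm.subset (List.mem_cons_self ..)
      · rintro ⟨hqs, hqm, hqsum, hlq⟩
        refine List.mem_map.mpr ⟨q.erase l, ?_, ?_⟩
        · apply (pvMMem (c - l) (q.erase l)).mpr
          refine ⟨List.Pairwise.erase _ hqs, ?_, ?_⟩
          · exact fun a ha => hqm a (List.mem_of_mem_erase ha)
          · have := List.sum_erase (l := q) hlq
            omega
        · apply pvSortedEq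
          · exact (pvInsort_perm l (q.erase l)).trans (List.perm_cons_erase hlq).symm
          · exact pvInsort_pairwise l (List.Pairwise.erase _ hqs)
          · exact hqs
    conv_lhs => rw [List.flatMap_cons]
    conv_rhs => rw [List.flatMap_cons]
    rw [pvFresh_append _ _ seen
        ((((pvComps (c - l)).map pvMsort).map (pvInsort l)) ++ seen)
        (by intro q; simp [List.mem_append])]
    have hinj : ∀ a ∈ (pvComps (c - l)).map pvMsort, ∀ b ∈ (pvComps (c - l)).map pvMsort,
        pvInsort l a = pvInsort l b → a = b := by
      intro a ha b hb hab
      obtain ⟨has, _, _⟩ := (pvMMem (c - l) a).mp ha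
      obtain ⟨hbs, _, _⟩ := (pvMMem (c - l) b).mp hb
      exact pvInsort_inj has hbs hab
    have hmem' : ∀ p ∈ (pvComps (c - l)).map pvMsort,
        (pvInsort l p ∈ seen ↔ p ∈ ((pvComps (c - l)).map pvMsort).filter
          (fun p => p.any (fun a => decide (a < m)))) := by
      intro p hp
      obtain ⟨hps, hpm, hpsum⟩ := (pvMMem (c - l) p).mp hp
      have hperm := pvInsort_perm l p
      have hq : (pvInsort l p ∈ seen ↔ ∃ a ∈ pvInsort l p, a < m) := by
        apply hseen
        · exact pvInsort_pairwise l hps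
        · intro a ha
          rcases List.mem_cons.mp (hperm.subset ha) with rfl | ha
          · exact hlp
          · exact hpm a ha
        · rw [hperm.sum_eq, List.sum_cons, hpsum]; omega
      rw [hq, List.mem_filter]
      constructor
      · rintro ⟨a, ha, ham⟩
        rcases List.mem_cons.mp (hperm.subset ha) with rfl | ha
        · omega
        · exact ⟨hp, List.any_eq_true.mpr ⟨a, ha, by simpa using ham⟩⟩
      · rintro ⟨_, hany⟩
        obtain ⟨a, ha, ham⟩ := List.any_eq_true.mp hany
        exact ⟨a, hperm.symm.subset (List.mem_cons_of_mem _ ha), by simpa using ham⟩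
    have hblock : pvFresh seen (((pvComps (c - l)).map pvMsort).map (pvInsort l))
        = (pvGen (c - l) l).map (l :: ·) := by
      rw [pvFresh_map (pvInsort l) ((pvComps (c - l)).map pvMsort) seen
          (((pvComps (c - l)).map pvMsort).filter (fun p => p.any (fun a => decide (a < m))))
          hinj hmem']
      rw [pvFresh_filter, IH (c - l) hd0 hdlt]
      have hfc : (pvGen (c - l) 1).filter
          (fun q => decide (q ∉ ((pvComps (c - l)).map pvMsort).filter
            (fun p => p.any (fun a => decide (a < m)))))
          = (pvGen (c - l) 1).filter (fun q => q.all (fun a => decide (l ≤ a))) := by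
        apply List.filter_congr
        intro q hq
        obtain ⟨hqs, hqm, hqsum⟩ := (pvGenMem (c - l) 1 q).mp hq
        have hqM : q ∈ (pvComps (c - l)).map pvMsort :=
          (pvMMem (c - l) q).mpr ⟨hqs, fun a ha => (hqm a ha).1, hqsum⟩
        have hq1 : ∀ a ∈ q, 1 ≤ a := fun a ha => pvPartsAsc_pos a (hqm a ha).1
        rw [Bool.eq_iff_iff]
        simp only [decide_eq_true_eq, List.mem_filter, List.any_eq_true, not_and,
          not_exists, not_lt, List.all_eq_true]
        constructor
        · intro hno a ha
          have hma : m ≤ a := by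
            have h' := hno hqM a
            exact h' ha
          by_contra hla
          have hac : a ≤ c := by
            have := pvElemLeSum q hq1 a ha
            omega
          have := hcompl a (hqm a ha).1 hma hac
          rcases List.mem_cons.mp this with rfl | hmem''
          · omega
          · have := hlt a hmem''
            omega
        · intro hall _ x hx
          have := hall x hx
          omega
      rw [hfc, pvGenFilter (c - l) 1 l (le_refl 1) hl1]
      apply List.map_congr_left
      intro q hq
      obtain ⟨_, hqm, _⟩ := (pvGenMem (c - l) l q).mp hq
      exact pvInsort_of_le l q (fun x hx => (hqm x hx).2)
    rw [hblock]
    congr 1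
    have hcompl' : ∀ x ∈ pvPartsAsc, l + 1 ≤ x → x ≤ c → x ∈ L' := by
      intro x hx hmx hxc
      have hmx' : m ≤ x := by omega
      have := hcompl x hx hmx' hxc
      rcases List.mem_cons.mp this with rfl | hx'
      · omega
      · exact hx'
    have hseen' : ∀ q : List Int, q.Pairwise (· ≤ ·) → (∀ a ∈ q, a ∈ pvPartsAsc) →
        q.sum = c →
        (q ∈ (((pvComps (c - l)).map pvMsort).map (pvInsort l)) ++ seen ↔
          ∃ a ∈ q, a < l + 1) := by
      intro q hqs hqm hqsum
      rw [List.mem_append, hXmem q, hseen q hqs hqm hqsum]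
      constructor
      · rintro (⟨_, _, _, hlq⟩ | ⟨a, ha, ham⟩)
        · exact ⟨l, hlq, by omega⟩
        · exact ⟨a, ha, by omega⟩
      · rintro ⟨a, ha, hal⟩
        by_cases ham : a < m
        · exact Or.inr ⟨a, ha, ham⟩
        · have hma : m ≤ a := by omega
          have ha1 : ∀ x ∈ q, 1 ≤ x := fun x hx => pvPartsAsc_pos x (hqm x hx)
          have hac : a ≤ c := by
            have := pvElemLeSum q ha1 a ha
            omega
          have := hcompl a (hqm a ha) hma hac
          rcases List.mem_cons.mp this with rfl | hmem''
          · exact Or.inl ⟨hqs, hqm, hqsum, ha⟩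
          · have := hlt a hmem''
            omega
    exact ihL (l + 1)
        ((((pvComps (c - l)).map pvMsort).map (pvInsort l)) ++ seen)
        (List.pairwise_cons.mp hsort).2
        (fun x hx => ⟨(hmem x (List.mem_cons_of_mem _ hx)).1,
          (by have := hlt x hx; omega),
          (hmem x (List.mem_cons_of_mem _ hx)).2.2⟩)
        (by omega)
        hcompl' hseen'

theorem pvMain : ∀ (c : Int), pvFresh [] ((pvComps c).map pvMsort) = pvGen c 1 := by
  suffices H : ∀ (n : Nat) (c : Int), c.toNat = n →
      pvFresh [] ((pvComps c).map pvMsort) = pvGen c 1 by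
    intro c; exact H c.toNat c rfl
  intro n
  induction n using Nat.strong_induction_on with
  | _ n ih =>
    intro c hn
    by_cases hc : c = 0
    · subst hc
      rw [pvComps_zero, pvGen_zero]
      rfl
    · rcases lt_or_gt_of_ne hc with hneg | hpos
      · rw [pvCompsNeg hneg, pvGenNeg hneg]
        rfl
      · have IH : ∀ d : Int, 0 ≤ d → d < c →
            pvFresh [] ((pvComps d).map pvMsort) = pvGen d 1 := by
          intro d hd0 hdc
          exact ih d.toNat (by omega) d rfl
        rw [pvComps_ne hc, List.map_flatMap]
        have hshape : ∀ l ∈ pvPartsAsc.filter (fun l => decide (l ≤ c)),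
            ((pvComps (c - l)).map (l :: ·)).map pvMsort
              = ((pvComps (c - l)).map pvMsort).map (pvInsort l) := by
          intro l _
          rw [List.map_map, List.map_map]
          apply List.map_congr_left
          intro w _
          exact pvMsort_cons l w
        rw [pvFlatMapCongr _ _ _ hshape]
        have hsorted : (pvPartsAsc.filter (fun l => decide (l ≤ c))).Pairwise (· < ·) :=
          List.Pairwise.filter _ (by decide : pvPartsAsc.Pairwise (· < ·))
        have hmem : ∀ l ∈ pvPartsAsc.filter (fun l => decide (l ≤ c)),
            l ∈ pvPartsAsc ∧ (1 : Int) ≤ l ∧ l ≤ c := by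
          intro l hl
          rw [List.mem_filter] at hl
          exact ⟨hl.1, pvPartsAsc_pos l hl.1, by simpa using hl.2⟩
        have hcompl : ∀ x ∈ pvPartsAsc, (1 : Int) ≤ x → x ≤ c →
            x ∈ pvPartsAsc.filter (fun l => decide (l ≤ c)) := by
          intro x hx _ hxc
          rw [List.mem_filter]
          exact ⟨hx, by simpa using hxc⟩
        have hseen : ∀ q : List Int, q.Pairwise (· ≤ ·) → (∀ a ∈ q, a ∈ pvPartsAsc) →
            q.sum = c → (q ∈ ([] : List (List Int)) ↔ ∃ a ∈ q, a < 1) := by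
          intro q _ hqm _
          simp only [List.not_mem_nil, false_iff, not_exists, not_and]
          intro a ha ha1
          have := pvPartsAsc_pos a (hqm a ha)
          omega
        rw [pvBlocks c hpos IH (pvPartsAsc.filter (fun l => decide (l ≤ c))) 1 []
            hsorted hmem (le_refl 1) hcompl hseen]
        rw [pvGen_ne hc]
        have : pvPartsAsc.filter (fun l => decide (1 ≤ l ∧ l ≤ c))
            = pvPartsAsc.filter (fun l => decide (l ≤ c)) := by
          apply List.filter_congr
          intro x hx
          have := pvPartsAsc_pos x hx
          simp only [decide_eq_decide]
          omega
        rw [this]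

-- ===== VERDICT (by name: the statement is the Claim_ definition above) =====
theorem find_permutations_iteratively_spec : Claim_equal_find_permutations_iteratively := by
  intro t _
  show find_permutations_iteratively t = find_permutations_iteratively_alt t
  have hA : find_permutations_iteratively t = pvGen t 1 := by
    rw [find_permutations_iteratively,
        pvLoopA_emit (pvStackMeasure [(t, [])]) [(t, [])] PySem.Set.empty le_rfl]
    rw [List.flatMap_cons, List.flatMap_nil, List.append_nil]
    rw [pvFoldAdd]
    rw [show (PySem.Set.empty : PySem.Set (List Int)) = ([] : List (List Int)) from rfl,
        List.nil_append]
    rw [pvEmit_eq t []]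
    rw [show (fun w => pvMsort ([] ++ w)) = pvMsort from by
      funext w; rw [List.nil_append]]
    exact pvMain t
  have hB : find_permutations_iteratively_alt t = pvGen t 1 := by
    rw [find_permutations_iteratively_alt, PySem.Set.ofList_eq_foldl, pvFoldAdd,
        List.nil_append]
    have hnd : (pvGen t 1).Nodup := pvMain t ▸ pvFresh_nodup _ _
    exact pvFresh_id _ _ (by intro x _ hx; cases hx) hnd
  rw [hA, hB]
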